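-- pv_equiv track=rewrite | github.com/Virtualbasic/Matura | 2019 stara/4.3.py | checkPola
-- ===== SOURCE A (Python) =====
-- def checkPola(D):
--     for i in range(len(D)):
--         z = []
--         for j in range(len(D[i])):
--             z.append(D[i][j])
--         D[i] = z
--     g = 0
--     tmp = []
--     while g < 30:
--         for i in range(g+1):
--             for j in range(g+1):
--                 tmp.append(D[i][j])
--         if "X" in tmp:
--             return g
--         g+=1
--         tmp = []
-- ===== SOURCE B (Python) =====
-- def checkPola(D):
--     # same observable mutation as A: each row replaced by a fresh list copy
--     for i in range(len(D)):
--         D[i] = list(D[i])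
--     # grow the square one layer at a time: at step g only the new border
--     # cells D[g][0..g] and D[0..g-1][g] can make "X" appear for the first time
--     for g in range(30):
--         if D[g][g] == "X" \
--            or any(D[g][j] == "X" for j in range(g)) \
--            or any(D[i][g] == "X" for i in range(g)):
--             return g
-- ===== Notes on version B (the rewrite author's own statement) =====
-- stated objective: alternative
-- what changed: Instead of rebuilding and scanning the whole (g+1)x(g+1) square at every step, B examines only the newly added border cells of the growing square, returning at the first layer that contains 'X'.
import Mathlib
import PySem

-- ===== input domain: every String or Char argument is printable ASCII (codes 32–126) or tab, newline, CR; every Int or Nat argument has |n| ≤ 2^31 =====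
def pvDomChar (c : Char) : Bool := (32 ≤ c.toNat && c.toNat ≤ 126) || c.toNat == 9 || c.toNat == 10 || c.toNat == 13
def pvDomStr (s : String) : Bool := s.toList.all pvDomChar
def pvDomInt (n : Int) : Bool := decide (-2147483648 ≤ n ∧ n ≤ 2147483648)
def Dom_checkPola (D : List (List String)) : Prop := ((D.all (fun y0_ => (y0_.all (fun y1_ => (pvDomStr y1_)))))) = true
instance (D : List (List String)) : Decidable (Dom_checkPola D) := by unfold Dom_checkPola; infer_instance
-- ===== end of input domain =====

-- B replaces A's rebuild-and-rescan of the whole (g+1)x(g+1) square at every step by a scan of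
-- only the newly added border cells (alternative decomposition, same first-hit result).
-- Both A and B mutate the argument by replacing each row with a fresh copy; the equivalence
-- proved here is about the RETURN value (the mutation is identical in both).


-- ===== PORT A =====
-- D[i][j]; out-of-range reads are excluded by Pre_checkPola (Python raises IndexError there)
def pvCell (D : List (List String)) (i j : Nat) : String :=
  (D.getD i []).getD j ""

-- A's first loop: z = []; z.append(D[i][j]) for each j; D[i] = z  (a fresh copy of row i)
def pvCopyRow (row : List String) : List String :=
  row.foldl (fun z x => z ++ [x]) []

-- A's while loop: build tmp over the whole (g+1)x(g+1) square, then test "X" in tmp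
def pvLoopA (D : List (List String)) (g : Nat) : Option Int :=
  if g < 30 then
    if ((List.range (g+1)).foldl
        (fun acc i => (List.range (g+1)).foldl (fun acc2 j => acc2 ++ [pvCell D i j]) acc) []).contains "X"
    then some (g : Int) else pvLoopA D (g+1)
  else none
termination_by 30 - g

def checkPola (D : List (List String)) : Option Int :=
  pvLoopA (D.map pvCopyRow) 0

-- ===== PORT B =====
-- B's loop: at step g test only the new border cells D[g][0..g] and D[0..g-1][g]
def pvLoopB (D : List (List String)) (g : Nat) : Option Int :=
  if g < 30 then
    if pvCell D g g == "X"
        || (List.range g).any (fun j => pvCell D g j == "X")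
        || (List.range g).any (fun i => pvCell D i g == "X")
    then some (g : Int) else pvLoopB D (g+1)
  else none
termination_by 30 - g

def checkPola_alt (D : List (List String)) : Option Int :=
  -- B's first loop D[i] = list(D[i]) replaces each row by a fresh copy: the identity on pure lists
  pvLoopB D 0

-- ===== PRECONDITION & SPEC =====
-- rows 0..g all exist and have length > g (so stage g of A reads no index out of range)
def pvOk (D : List (List String)) (g : Nat) : Prop :=
  ∀ i, i ≤ g → i < D.length ∧ g < (D.getD i []).length

-- the (g+1)x(g+1) top-left square contains "X"
def pvSqX (D : List (List String)) (g : Nat) : Prop :=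
  ∃ i, i ≤ g ∧ ∃ j, j ≤ g ∧ pvCell D i j = "X"

-- Pre_ excludes exactly the inputs on which A raises IndexError (an undersized matrix reached
-- before "X" is found): A returns normally iff the full 30x30 square is in bounds or some fully
-- in-bounds top-left square already contains "X".
def Pre_checkPola (D : List (List String)) : Prop :=
  pvOk D 29 ∨ ∃ g, g < 30 ∧ pvOk D g ∧ pvSqX D g
instance (D : List (List String)) : Decidable (Pre_checkPola D) := by
  unfold Pre_checkPola pvOk pvSqX; infer_instance

def pvWitness_checkPola : List (List String) := [["X"]]

def Spec_checkPola (D : List (List String)) (out : Option Int) : Prop := out = checkPola_alt D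
instance (D : List (List String)) (out : Option Int) : Decidable (Spec_checkPola D out) := by unfold Spec_checkPola; infer_instance

-- ===== CLAIM (what is proved, stated in full; the proofs are below) =====
def Claim_equal_checkPola : Prop := ∀ (D : List (List String)), Dom_checkPola D → Pre_checkPola D → Spec_checkPola D (checkPola D)

-- ===== LEMMAS AND PROOFS =====

theorem pvCopyRow_id (row : List String) : pvCopyRow row = row := by
  simpa [pvCopyRow] using PySem.List.foldl_append_singleton_eq_map id row []

theorem pvTmp_eq (D : List (List String)) (g : Nat) :
    (List.range (g+1)).foldl
      (fun acc i => (List.range (g+1)).foldl (fun acc2 j => acc2 ++ [pvCell D i j]) acc) []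
    = (List.range (g+1)).flatMap (fun i => (List.range (g+1)).map (pvCell D i)) := by
  have h1 : (List.range (g+1)).foldl
      (fun acc i => (List.range (g+1)).foldl (fun acc2 j => acc2 ++ [pvCell D i j]) acc) []
      = (List.range (g+1)).foldl (fun acc i => acc ++ (List.range (g+1)).map (pvCell D i)) [] :=
    by
      apply PySem.List.foldl_congr_mem
      intro acc i _
      exact PySem.List.foldl_append_singleton_eq_map (pvCell D i) (List.range (g+1)) acc
  rw [h1, PySem.List.foldl_append_eq_flatMap]
  simp

theorem pvCondA_iff (D : List (List String)) (g : Nat) :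
    (((List.range (g+1)).foldl
      (fun acc i => (List.range (g+1)).foldl (fun acc2 j => acc2 ++ [pvCell D i j]) acc) []).contains "X" = true)
    ↔ pvSqX D g := by
  rw [pvTmp_eq]
  simp [List.mem_flatMap, List.mem_map, List.mem_range, pvSqX, eq_comm]

theorem pvCondB_iff (D : List (List String)) (g : Nat) :
    ((pvCell D g g == "X"
        || (List.range g).any (fun j => pvCell D g j == "X")
        || (List.range g).any (fun i => pvCell D i g == "X")) = true)
    ↔ (pvCell D g g = "X" ∨ (∃ j, j < g ∧ pvCell D g j = "X") ∨ (∃ i, i < g ∧ pvCell D i g = "X")) := by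
  simp [List.any_eq_true, List.mem_range, or_assoc]

-- one unfolding step of each loop, with its test phrased as a Prop
theorem pvLoopA_hit (D : List (List String)) (g : Nat) (h : g < 30) (hsq : pvSqX D g) :
    pvLoopA D g = some (g : Int) := by
  rw [pvLoopA, if_pos h, if_pos ((pvCondA_iff D g).mpr hsq)]

theorem pvLoopA_miss (D : List (List String)) (g : Nat) (h : g < 30) (hsq : ¬ pvSqX D g) :
    pvLoopA D g = pvLoopA D (g+1) := by
  rw [pvLoopA, if_pos h, if_neg (fun h' => hsq ((pvCondA_iff D g).mp h'))]

theorem pvLoopB_hit (D : List (List String)) (g : Nat) (h : g < 30)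
    (hd : pvCell D g g = "X" ∨ (∃ j, j < g ∧ pvCell D g j = "X") ∨ (∃ i, i < g ∧ pvCell D i g = "X")) :
    pvLoopB D g = some (g : Int) := by
  rw [pvLoopB, if_pos h, if_pos ((pvCondB_iff D g).mpr hd)]

theorem pvLoopB_miss (D : List (List String)) (g : Nat) (h : g < 30)
    (hd : ¬ (pvCell D g g = "X" ∨ (∃ j, j < g ∧ pvCell D g j = "X") ∨ (∃ i, i < g ∧ pvCell D i g = "X"))) :
    pvLoopB D g = pvLoopB D (g+1) := by
  rw [pvLoopB, if_pos h, if_neg (fun h' => hd ((pvCondB_iff D g).mp h'))]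

-- the border condition implies the square condition …
theorem pvDelta_imp_sq (D : List (List String)) (g : Nat)
    (h : pvCell D g g = "X" ∨ (∃ j, j < g ∧ pvCell D g j = "X") ∨ (∃ i, i < g ∧ pvCell D i g = "X")) :
    pvSqX D g := by
  rcases h with h | ⟨j, hj, h⟩ | ⟨i, hi, h⟩
  · exact ⟨g, le_refl g, g, le_refl g, h⟩
  · exact ⟨g, le_refl g, j, Nat.le_of_lt hj, h⟩
  · exact ⟨i, Nat.le_of_lt hi, g, le_refl g, h⟩

-- … and conversely: if no strictly smaller square contains "X", an "X" in square g is on the border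
theorem pvSq_imp_delta (D : List (List String)) (g : Nat) (hnew : ∀ g', g' < g → ¬ pvSqX D g')
    (h : pvSqX D g) :
    pvCell D g g = "X" ∨ (∃ j, j < g ∧ pvCell D g j = "X") ∨ (∃ i, i < g ∧ pvCell D i g = "X") := by
  rcases h with ⟨i, hi, j, hj, hc⟩
  rcases Nat.lt_or_ge i g with hig | hig
  · rcases Nat.lt_or_ge j g with hjg | hjg
    · exact absurd (⟨i, by omega, j, by omega, hc⟩ : pvSqX D (g-1)) (hnew (g-1) (by omega))
    · right; right; exact ⟨i, hig, by rwa [show j = g by omega] at hc⟩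
  · rcases Nat.lt_or_ge j g with hjg | hjg
    · right; left; exact ⟨j, hjg, by rwa [show i = g by omega] at hc⟩
    · left; rwa [show i = g by omega, show j = g by omega] at hc

theorem pvLoops_eq (D : List (List String)) :
    ∀ n g, 30 - g ≤ n → (∀ g', g' < g → ¬ pvSqX D g') → pvLoopA D g = pvLoopB D g := by
  intro n
  induction n with
  | zero =>
      intro g hg _
      rw [pvLoopA, pvLoopB]
      simp [show ¬ g < 30 by omega]
  | succ n ih =>
      intro g hg hnew
      by_cases h30 : g < 30
      · by_cases hsq : pvSqX D g
        · rw [pvLoopA_hit D g h30 hsq, pvLoopB_hit D g h30 (pvSq_imp_delta D g hnew hsq)]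
        · rw [pvLoopA_miss D g h30 hsq, pvLoopB_miss D g h30 (fun h' => hsq (pvDelta_imp_sq D g h'))]
          refine ih (g+1) (by omega) ?_
          intro g' hg'
          rcases Nat.lt_or_ge g' g with h' | h'
          · exact hnew g' h'
          · rwa [show g' = g by omega]
      · rw [pvLoopA, pvLoopB]
        simp [h30]

-- ===== VERDICT (by name: the statement is the Claim_ definition above) =====
theorem checkPola_spec : Claim_equal_checkPola := by
  intro D _ _
  show checkPola D = checkPola_alt D
  unfold checkPola checkPola_alt
  rw [show pvCopyRow = id from funext pvCopyRow_id, List.map_id]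
  exact pvLoops_eq D 30 0 (by omega) (by intro g' h; omega)
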